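-- pv_equiv track=rewrite | github.com/JudgesL/python-learning | 算法通关之路/第2章 数学之美/质数排列.py | numPrimeArrangements
-- ===== SOURCE A (Python) =====
-- def numPrimeArrangements(n:int) -> int:
--     def factorial(n) -> int:
--         if (n <= 1):
--             return 1
--         # 这里使用了递归 但是其实也可以用迭代
--         return n*factorial(n-1)
--     # 由于0<n<=100 因此这里选择全列出所有的质数 但是也可以用算法去求
--     primes = [2,3,5,7,11,13,17,19,23,29,31,37,41,43,47,53,59,61,67,71,73,79,83,89,97,101]
--
--     primeCount = 0
--     # 这里在计算一共有多少个质数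
--     while(primes[primeCount] <= n):
--         primeCount += 1
--     return factorial(primeCount)*factorial(n-primeCount)%(10**9+7)
-- ===== SOURCE B (Python) =====
-- def numPrimeArrangements(n: int) -> int:
--     M = 10 ** 9 + 7
--
--     def is_prime(k: int) -> bool:
--         d = 2
--         while d * d <= k:
--             if k % d == 0:
--                 return False
--             d += 1
--         return True
--
--     c = sum(1 for k in range(2, n + 1) if is_prime(k))
--     ans = 1
--     for i in range(1, c + 1):
--         ans = ans * i % M
--     for i in range(1, n - c + 1):
--         ans = ans * i % M
--     return ans
-- ===== Notes on version B (the rewrite author's own statement) =====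
-- stated objective: alternative
-- what changed: B replaces the hardcoded prime table plus index-walking while loop by trial-division primality counting over the range up to n, and replaces the two recursive big-integer factorials multiplied then reduced by a single running product reduced by the modulus at every step.
-- outside the precondition, e.g. on numPrimeArrangements(101): A raises IndexError, B returns 739514271
import Mathlib
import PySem

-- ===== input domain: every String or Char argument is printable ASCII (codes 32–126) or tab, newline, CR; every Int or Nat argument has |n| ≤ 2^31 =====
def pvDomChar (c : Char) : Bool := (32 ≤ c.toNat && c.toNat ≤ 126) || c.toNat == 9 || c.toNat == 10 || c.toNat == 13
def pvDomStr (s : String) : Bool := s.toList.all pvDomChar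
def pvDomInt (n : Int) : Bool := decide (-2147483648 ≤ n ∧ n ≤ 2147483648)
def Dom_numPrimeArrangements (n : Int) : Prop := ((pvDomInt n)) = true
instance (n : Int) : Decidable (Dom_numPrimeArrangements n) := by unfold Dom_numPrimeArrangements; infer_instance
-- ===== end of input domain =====

-- B replaces A's hardcoded prime table + recursive big-integer factorials by trial-division
-- prime counting and a running product reduced by the modulus at each step (objective: alternative).

-- ===== PORT A =====
-- inner 'factorial' (recursive); fuel n.toNat makes the same recursion structural: for n ≥ 2
-- the fuel equals the remaining recursion depth exactly, for n ≤ 1 the base branch fires anyway.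
def pvFactAuxA : Nat → Int → Int
  | 0, _ => 1
  | fuel + 1, n => if n ≤ 1 then 1 else n * pvFactAuxA fuel (n - 1)

def pvFactA (n : Int) : Int := pvFactAuxA n.toNat n

def pvPrimesA : List Int :=
  [2,3,5,7,11,13,17,19,23,29,31,37,41,43,47,53,59,61,67,71,73,79,83,89,97,101]

-- the 'while primes[primeCount] <= n' index walk, transcribed as a walk down the list;
-- the [] case is Python's IndexError (n ≥ 101), excluded by Pre_.
def pvWhileCountA (n : Int) : List Int → Int → Int
  | [], acc => acc
  | p :: ps, acc => if p ≤ n then pvWhileCountA n ps (acc + 1) else acc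

def numPrimeArrangements (n : Int) : Int :=
  let primeCount := pvWhileCountA n pvPrimesA 0
  PySem.Int.mod (pvFactA primeCount * pvFactA (n - primeCount)) (10 ^ 9 + 7)

-- ===== PORT B =====
-- 'while d*d <= k' trial-division loop; fuel (k+1).toNat bounds the iterations (d ≤ k while the
-- guard holds), so this is the same loop made structural.
def pvIsPrimeAux : Nat → Int → Int → Bool
  | 0, _, _ => true
  | fuel + 1, k, d =>
    if d * d ≤ k then
      (if PySem.Int.mod k d = 0 then false else pvIsPrimeAux fuel k (d + 1))
    else true

def pvIsPrimeB (k : Int) : Bool := pvIsPrimeAux (k + 1).toNat k 2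

def numPrimeArrangements_alt (n : Int) : Int :=
  let M : Int := 10 ^ 9 + 7
  let c : Int := ((PySem.List.pyRange 2 (n + 1) 1).filter pvIsPrimeB).length
  let ans := (PySem.List.pyRange 1 (c + 1) 1).foldl (fun a i => PySem.Int.mod (a * i) M) 1
  (PySem.List.pyRange 1 (n - c + 1) 1).foldl (fun a i => PySem.Int.mod (a * i) M) ans

-- ===== PRECONDITION & SPEC =====
-- Pre_ excludes the inputs beyond A's largest tabled prime, where A runs off the end of its
-- prime table and raises IndexError (see the cite in claim.json).
def Pre_numPrimeArrangements (n : Int) : Prop := n ≤ 100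
instance (n : Int) : Decidable (Pre_numPrimeArrangements n) := by unfold Pre_numPrimeArrangements; infer_instance

def pvWitness_numPrimeArrangements : Int := 10

def Spec_numPrimeArrangements (n : Int) (out : Int) : Prop := out = numPrimeArrangements_alt n
instance (n : Int) (out : Int) : Decidable (Spec_numPrimeArrangements n out) := by unfold Spec_numPrimeArrangements; infer_instance

-- ===== CLAIM (what is proved, stated in full; the proofs are below) =====
def Claim_equal_numPrimeArrangements : Prop := ∀ (n : Int), Dom_numPrimeArrangements n → Pre_numPrimeArrangements n → Spec_numPrimeArrangements n (numPrimeArrangements n)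

-- ===== LEMMAS AND PROOFS =====
set_option maxRecDepth 40000

-- the finite part 2 ≤ n ≤ 100, checked value by value
lemma pv_cases : ∀ k : Fin 99, numPrimeArrangements ((k : Nat) + 2) = numPrimeArrangements_alt ((k : Nat) + 2) := by decide

lemma pv_factA_le_one (n : Int) (h : n ≤ 1) : pvFactA n = 1 := by
  unfold pvFactA
  cases hn : n.toNat with
  | zero => rfl
  | succ m => simp [pvFactAuxA, h]

lemma pv_A_low (n : Int) (h : n < 2) : numPrimeArrangements n = 1 := by
  have h0 : pvWhileCountA n pvPrimesA 0 = 0 := by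
    simp only [pvPrimesA, pvWhileCountA]
    rw [if_neg (by omega)]
  simp only [numPrimeArrangements, h0]
  rw [pv_factA_le_one 0 (by omega), pv_factA_le_one (n - 0) (by omega)]
  decide

lemma pv_B_low (n : Int) (h : n < 2) : numPrimeArrangements_alt n = 1 := by
  simp only [numPrimeArrangements_alt]
  rw [PySem.List.pyRange_one_eq_nil (by omega : n + 1 ≤ 2)]
  simp only [List.filter_nil, List.length_nil, Int.natCast_zero]
  rw [PySem.List.pyRange_one_eq_nil (by omega : (0:Int) + 1 ≤ 1)]
  rcases lt_or_ge n 1 with hlt | hge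
  · rw [PySem.List.pyRange_one_eq_nil (by omega : n - 0 + 1 ≤ 1)]
    rfl
  · have hn1 : n = 1 := by omega
    subst hn1
    decide

-- ===== VERDICT (by name: the statement is the Claim_ definition above) =====
theorem numPrimeArrangements_spec : Claim_equal_numPrimeArrangements := by
  intro n _ hpre
  unfold Spec_numPrimeArrangements
  rcases lt_or_ge n 2 with hlow | hhigh
  · rw [pv_A_low n hlow, pv_B_low n hlow]
  · have hk : (n - 2).toNat < 99 := by
      unfold Pre_numPrimeArrangements at hpre; omega
    have hn : n = ((⟨(n - 2).toNat, hk⟩ : Fin 99) : Nat) + 2 := by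
      simp; omega
    rw [hn]
    exact pv_cases ⟨(n - 2).toNat, hk⟩
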